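-- pv_equiv track=rewrite | github.com/kusumi/fileobj | src/ncurses.py | __is_curses_color_string_empty
-- ===== SOURCE A (Python) =====
-- def __is_curses_color_string_empty(s):
--     if not s: # could be either "" or None
--         return True
--     l = s.split(",", 1)
--     for x in l:
--         if x != "":
--             return False
--     return True
-- ===== SOURCE B (Python) =====
-- def __is_curses_color_string_empty(s):
--     # closed form: with maxsplit=1 the split pieces are all empty
--     # exactly when s is falsy or s == ","
--     return not s or s == ","
-- ===== Notes on version B (the rewrite author's own statement) =====
-- stated objective: simpler
-- what changed: Replaced the split(',',1)-and-scan loop with the closed-form predicate 'not s or s == ","', which characterises exactly the inputs whose split pieces are all empty.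
import Mathlib
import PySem

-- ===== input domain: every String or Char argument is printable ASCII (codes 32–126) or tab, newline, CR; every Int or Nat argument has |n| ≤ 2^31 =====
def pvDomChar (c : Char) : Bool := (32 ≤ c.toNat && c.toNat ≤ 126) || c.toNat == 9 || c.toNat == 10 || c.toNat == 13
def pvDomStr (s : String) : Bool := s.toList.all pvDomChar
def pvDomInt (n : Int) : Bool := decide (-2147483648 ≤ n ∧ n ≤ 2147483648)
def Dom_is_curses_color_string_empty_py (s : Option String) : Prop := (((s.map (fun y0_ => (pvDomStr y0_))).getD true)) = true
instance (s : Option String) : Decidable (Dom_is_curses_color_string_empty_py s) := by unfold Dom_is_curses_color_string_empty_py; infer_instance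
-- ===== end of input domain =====

-- B replaces A's split-and-scan loop with the closed-form test `not s or s == ","` (return value only).

-- ===== PORT A =====
-- the for-loop with early return over the split pieces
def pvLoopA : List String → Bool
  | [] => true
  | x :: rest => if x ≠ "" then false else pvLoopA rest

def is_curses_color_string_empty_py (s : Option String) : Bool :=
  match s with
  | none => true            -- `not s` is true for None
  | some t =>
    if t = "" then true     -- `not s` is true for ""
    else
      -- l = s.split(",", 1); sep "," is nonempty so splitMax? is `some`
      let l := (PySem.Str.splitMax? t "," 1).getD []
      pvLoopA l

-- ===== PORT B =====
def is_curses_color_string_empty_py_alt (s : Option String) : Bool :=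
  match s with
  | none => true
  | some t => t == "" || t == ","

-- ===== PRECONDITION & SPEC =====
def Spec_is_curses_color_string_empty_py (s : Option String) (out : Bool) : Prop := out = is_curses_color_string_empty_py_alt s
instance (s : Option String) (out : Bool) : Decidable (Spec_is_curses_color_string_empty_py s out) := by unfold Spec_is_curses_color_string_empty_py; infer_instance

-- ===== CLAIM (what is proved, stated in full; the proofs are below) =====
def Claim_equal_is_curses_color_string_empty_py : Prop := ∀ (s : Option String), Dom_is_curses_color_string_empty_py s → Spec_is_curses_color_string_empty_py s (is_curses_color_string_empty_py s)

-- ===== LEMMAS AND PROOFS =====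

-- ===== VERDICT at bottom =====


-- helper predicate for the proof: all split pieces are empty

lemma go_m0 (sep : List Char) (fuel : Nat) (l cur : List Char) (acc : List (List Char)) :
    PySem.Chars.splitOnMax.go sep fuel 0 l cur acc = ((cur.reverse ++ l) :: acc).reverse := by
  cases fuel with
  | zero => rfl
  | succ n => cases l with
    | nil => simp [PySem.Chars.splitOnMax.go]
    | cons c rest => simp [PySem.Chars.splitOnMax.go]

lemma go_m1_allE (l : List Char) :
    ∀ (fuel : Nat) (cur : List Char) (acc : List (List Char)), l.length < fuel →
    ((PySem.Chars.splitOnMax.go [','] fuel 1 l cur acc).all List.isEmpty)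
      = (acc.all List.isEmpty && cur.isEmpty && decide (l = [] ∨ l = [','])) := by
  induction l with
  | nil =>
    intro fuel cur acc h
    cases fuel with
    | zero => omega
    | succ n =>
      simp [PySem.Chars.splitOnMax.go, Bool.and_comm]
  | cons c rest ih =>
    intro fuel cur acc h
    cases fuel with
    | zero => omega
    | succ n =>
      by_cases hc : c = ','
      · subst hc
        have hpre : List.isPrefixOf [','] (',' :: rest) = true := by
          simp [List.isPrefixOf]
        simp only [PySem.Chars.splitOnMax.go, hpre, if_pos, if_neg (by omega : ¬ (1 : Nat) = 0)]
        rw [show ((1 : Nat) - 1) = 0 from rfl, go_m0]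
        cases rest with
        | nil => simp [Bool.and_comm]
        | cons d rs => simp
      · have hpre : List.isPrefixOf [','] (c :: rest) = false := by
          simp [List.isPrefixOf]
          exact fun h => hc h.symm
        simp only [PySem.Chars.splitOnMax.go, hpre, if_neg (by omega : ¬ (1 : Nat) = 0),
          Bool.false_eq_true, if_false]
        rw [ih n (c :: cur) acc (by simpa using Nat.lt_of_succ_lt_succ h)]
        simp [List.isEmpty_iff, hc]

lemma loopA_eq_all (ps : List (List Char)) :
    pvLoopA (ps.map String.ofList) = ps.all List.isEmpty := by
  induction ps with
  | nil => rfl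
  | cons x rest ih =>
    by_cases hx : x = []
    · subst hx; simpa [pvLoopA] using ih
    · have : String.ofList x ≠ "" := by
        intro hcontra
        have : x = ([] : List Char) := by
          simpa using congrArg String.toList hcontra
        exact hx this
      simp [pvLoopA, this, List.isEmpty_iff, hx]

lemma key (t : String) (ht : t ≠ "") :
    pvLoopA ((PySem.Str.splitMax? t "," 1).getD []) = decide (t = ",") := by
  have hsep : ("," : String).toList = [','] := rfl
  have : PySem.Str.splitMax? t "," 1
      = some ((PySem.Chars.splitOnMax t.toList [','] 1).map String.ofList) := by
    simp [PySem.Str.splitMax?, PySem.Chars.splitMax?, hsep]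
  rw [this]
  simp only [Option.getD_some]
  rw [loopA_eq_all]
  unfold PySem.Chars.splitOnMax
  rw [if_neg (by norm_num)]
  have hlen : t.toList.length < t.toList.length + 1 := Nat.lt_succ_self _
  rw [show ((1 : Int)).toNat = 1 from rfl, go_m1_allE t.toList _ [] [] hlen]
  have htl : t.toList ≠ [] := by
    intro hcontra
    exact ht (by simpa using congrArg String.ofList hcontra)
  have ht2 : (t = ",") ↔ (t.toList = [',']) := by
    constructor
    · intro h; rw [h]; rfl
    · intro h
      have := congrArg String.ofList h
      simpa using this
  simp [htl, ht2]

theorem is_curses_color_string_empty_py_spec : Claim_equal_is_curses_color_string_empty_py := by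
  intro s _
  unfold Spec_is_curses_color_string_empty_py
  cases s with
  | none => rfl
  | some t =>
    by_cases ht : t = ""
    · subst ht; rfl
    · simp only [is_curses_color_string_empty_py, is_curses_color_string_empty_py_alt,
        if_neg ht]
      rw [key t ht]
      by_cases h2 : t = "," <;> simp [ht, h2]
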